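-- pv_equiv track=rewrite | github.com/LucasIME/adventofcode | 2017/q9/q9_hard.py | get_garbage_len
-- ===== SOURCE A (Python) =====
-- def get_garbage_len(entry, start, end):
--     total = 0
--     i = start + 1
--     while i < end:
--         item = entry[i]
--         if item == '!':
--             i += 1
--         else:
--             total += 1
--         i += 1
--     return total
-- ===== SOURCE B (Python) =====
-- def get_garbage_len(entry, start, end):
--     pieces = entry[start + 1:end].split('!')
--     total = len(pieces[0])
--     escaped_next = False
--     for piece in pieces[1:]:
--         if escaped_next:
--             escaped_next = False
--             total += len(piece)
--         elif piece:
--             total += len(piece) - 1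
--         else:
--             escaped_next = True
--     return total
-- ===== Notes on version B (the rewrite author's own statement) =====
-- stated objective: faster
-- what changed: Instead of a character-by-character loop that jumps the index past escaped characters, B splits the slice entry[start+1:end] on '!' (a C-level operation) and folds over the resulting pieces, adding whole piece lengths (minus one for a piece whose first character is escaped, with a flag for '!' escaping the next separator); per-character Python work disappears.
-- outside the precondition, e.g. on get_garbage_len('abc', -3, 2): A returns 4, B returns 1; on get_garbage_len('!>}a', 1, -1): A returns 0, B returns 1; on get_garbage_len('ab', 0, 5): A raises IndexError, B returns 1
import Mathlib
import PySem

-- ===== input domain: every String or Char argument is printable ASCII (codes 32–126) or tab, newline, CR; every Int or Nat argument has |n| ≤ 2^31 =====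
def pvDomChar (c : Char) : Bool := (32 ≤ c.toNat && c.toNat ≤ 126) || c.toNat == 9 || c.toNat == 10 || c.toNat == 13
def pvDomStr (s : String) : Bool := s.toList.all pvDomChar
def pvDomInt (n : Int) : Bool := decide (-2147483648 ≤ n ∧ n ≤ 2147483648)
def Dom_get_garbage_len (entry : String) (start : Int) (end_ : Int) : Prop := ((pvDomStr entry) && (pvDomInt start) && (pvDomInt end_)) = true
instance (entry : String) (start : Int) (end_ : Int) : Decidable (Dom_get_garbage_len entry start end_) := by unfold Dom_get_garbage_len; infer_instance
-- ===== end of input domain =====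

-- B replaces A's per-character index-jumping while loop by splitting the slice on '!' and folding over the pieces (measured constant-factor faster: C-level split/len replaces the per-character Python loop).

-- ===== PORT A =====
-- A's while loop: i walks from start+1, jumping by 2 past an '!' escape; entry[i] is
-- PySem.Str.pyGet? (none = IndexError; Pre_ excludes those inputs, the port then returns total).
def getGarbageLoopA (entry : String) (end_ : Int) (i : Int) (total : Int) : Int :=
  if _h : i < end_ then
    match PySem.Str.pyGet? entry i with
    | none => total  -- IndexError in Python; unreachable under Pre_
    | some item =>
      if item = '!' then getGarbageLoopA entry end_ (i + 2) total
      else getGarbageLoopA entry end_ (i + 1) (total + 1)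
  else total
termination_by (end_ - i).toNat
decreasing_by all_goals omega

def get_garbage_len (entry : String) (start : Int) (end_ : Int) : Int :=
  getGarbageLoopA entry end_ (start + 1) 0

-- ===== PORT B =====
-- B's loop body over a piece of the split: state = (escaped_next flag, total).
def gStep (st : Bool × Int) (p : List Char) : Bool × Int :=
  if st.1 then (false, st.2 + (p.length : Int))
  else if p ≠ [] then (false, st.2 + (p.length : Int) - 1)
  else (true, st.2)

-- B: pieces = entry[start+1:end].split('!'); total starts at len(pieces[0])
-- (split never returns an empty list, so pieces[0] is its headI); fold over pieces[1:].
def get_garbage_len_alt (entry : String) (start : Int) (end_ : Int) : Int :=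
  let pieces := PySem.Chars.splitOn (PySem.Str.slice entry (some (start + 1)) (some end_)).toList ['!']
  (pieces.tail.foldl gStep (false, (pieces.headI.length : Int))).2

-- ===== PRECONDITION & SPEC =====
-- Pre_ excludes ranges that use Python's negative-index / negative-bound semantics or reach
-- past the end of the string: there A raises IndexError, reads wrapped-around positions, or
-- (for end > len, via a trailing escape) accidentally returns — out-of-range positions are
-- not meaningful for this range counter, so B's slice semantics is as defensible as A's.
def Pre_get_garbage_len (entry : String) (start : Int) (end_ : Int) : Prop :=
  (start + 1 < end_ → 0 ≤ start + 1 ∧ end_ ≤ (entry.toList.length : Int)) ∧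
  (end_ ≤ start + 1 → (start + 1 < 0 ∨ 0 ≤ end_ ∨ (entry.toList.length : Int) + end_ ≤ start + 1))
instance (entry : String) (start : Int) (end_ : Int) : Decidable (Pre_get_garbage_len entry start end_) := by unfold Pre_get_garbage_len; infer_instance

def pvWitness_get_garbage_len : String × Int × Int := ("<a!bc>", 0, 5)

def Spec_get_garbage_len (entry : String) (start : Int) (end_ : Int) (out : Int) : Prop := out = get_garbage_len_alt entry start end_
instance (entry : String) (start : Int) (end_ : Int) (out : Int) : Decidable (Spec_get_garbage_len entry start end_ out) := by unfold Spec_get_garbage_len; infer_instance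

-- ===== CLAIM (what is proved, stated in full; the proofs are below) =====
def Claim_equal_get_garbage_len : Prop := ∀ (entry : String) (start : Int) (end_ : Int), Dom_get_garbage_len entry start end_ → Pre_get_garbage_len entry start end_ → Spec_get_garbage_len entry start end_ (get_garbage_len entry start end_)

-- ===== LEMMAS AND PROOFS =====

-- The garbage count of a character segment, following A's jump structure.
def countSeg : List Char → Int
  | [] => 0
  | c :: rest =>
    if c = '!' then
      match rest with
      | [] => 0
      | _ :: r => countSeg r
    else 1 + countSeg rest

theorem countSeg_nil : countSeg [] = 0 := rfl

theorem countSeg_bang (rest : List Char) : countSeg ('!' :: rest) = countSeg rest.tail := by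
  rw [countSeg.eq_def]; cases rest <;> simp [countSeg]

theorem countSeg_cons_ne (c : Char) (rest : List Char) (hc : ¬ c = '!') :
    countSeg (c :: rest) = 1 + countSeg rest := by
  rw [countSeg.eq_def]; simp [hc]

theorem take_tail {α : Type} (l : List α) (n : Nat) : (l.take n).tail = l.tail.take (n - 1) := by
  cases l <;> cases n <;> simp

-- A's loop computes countSeg of the in-range segment.
theorem loopA_eq_countSeg (entry : String) (end_ : Int)
    (hend : end_ ≤ (entry.toList.length : Int)) :
    ∀ (n : Nat) (i total : Int), 0 ≤ i → (end_ - i).toNat ≤ n →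
    getGarbageLoopA entry end_ i total
      = total + countSeg ((entry.toList.drop i.toNat).take (end_ - i).toNat) := by
  intro n
  induction n with
  | zero =>
    intro i total h0 hn
    rw [getGarbageLoopA]
    have hni : ¬ i < end_ := by omega
    rw [dif_neg hni]
    simp [show (end_ - i).toNat = 0 from by omega, countSeg_nil]
  | succ n ih =>
    intro i total h0 hn
    rw [getGarbageLoopA]
    by_cases hi : i < end_
    · have hk : i.toNat < entry.toList.length := by omega
      have hget : PySem.Str.pyGet? entry i = some (entry.toList[i.toNat]!) := by
        simp [PySem.Str.pyGet?, PySem.List.pyGet?_of_nonneg _ h0,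
          List.getElem?_eq_getElem hk, List.getElem!_eq_getElem?_getD]
      rw [dif_pos hi, hget]; dsimp only
      have hdrop : entry.toList.drop i.toNat
          = entry.toList[i.toNat]! :: entry.toList.drop (i.toNat + 1) := by
        rw [List.drop_eq_getElem_cons hk]
        simp [List.getElem!_eq_getElem?_getD, List.getElem?_eq_getElem hk]
      have htake : (end_ - i).toNat = (end_ - i - 1).toNat + 1 := by omega
      by_cases hc : entry.toList[i.toNat]! = '!'
      · rw [if_pos hc]
        rw [ih (i + 2) total (by omega) (by omega)]
        rw [hdrop, htake, List.take_succ_cons, hc, countSeg_bang, take_tail, List.tail_drop]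
        have e1 : (i + 2).toNat = i.toNat + 1 + 1 := by omega
        have e2 : (end_ - (i + 2)).toNat = (end_ - i - 1).toNat - 1 := by omega
        rw [e1, e2]
      · rw [if_neg hc]
        rw [ih (i + 1) (total + 1) (by omega) (by omega)]
        rw [hdrop, htake, List.take_succ_cons, countSeg_cons_ne _ _ hc]
        have e1 : (i + 1).toNat = i.toNat + 1 := by omega
        have e2 : (end_ - (i + 1)).toNat = (end_ - i - 1).toNat := by omega
        rw [e1, e2]
        ring
    · rw [dif_neg hi]
      simp [show (end_ - i).toNat = 0 from by omega, countSeg_nil]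

-- A structural model of str.split('!') (PySem.Chars.splitOn with sep = ['!']).
def mySplitAux : List Char → List Char → List (List Char)
  | [], cur => [cur.reverse]
  | c :: rest, cur => if c = '!' then cur.reverse :: mySplitAux rest [] else mySplitAux rest (c :: cur)

theorem go_eq (n : Nat) : ∀ (l cur : List Char) (acc : List (List Char)), l.length ≤ n →
    PySem.Chars.splitOn.go ['!'] n l cur acc = acc.reverse ++ mySplitAux l cur := by
  induction n with
  | zero =>
    intro l cur acc h
    have : l = [] := by cases l <;> simp_all
    subst this
    simp [PySem.Chars.splitOn.go, mySplitAux]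
  | succ n ih =>
    intro l cur acc h
    cases l with
    | nil => simp [PySem.Chars.splitOn.go, mySplitAux]
    | cons c rest =>
      rw [PySem.Chars.splitOn.go]
      by_cases hc : c = '!'
      · subst hc
        rw [if_pos (by simp [List.isPrefixOf])]
        simp only [List.length_singleton, List.drop_succ_cons, List.drop_zero]
        rw [ih rest [] _ (by simpa using h)]
        simp [mySplitAux]
      · rw [if_neg (by simp [List.isPrefixOf]; exact fun h => absurd h.symm hc)]
        rw [ih rest (c :: cur) acc (by simpa using h)]
        simp [mySplitAux, hc]

theorem splitOn_bang (s : List Char) : PySem.Chars.splitOn s ['!'] = mySplitAux s [] := by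
  rw [PySem.Chars.splitOn, go_eq (s.length + 1) s [] [] (by omega)]
  simp

theorem mySplitAux_shape (l cur : List Char) : ∃ q qs, mySplitAux l cur = q :: qs := by
  induction l generalizing cur with
  | nil => exact ⟨cur.reverse, [], rfl⟩
  | cons c rest ih =>
    by_cases hc : c = '!'
    · exact ⟨cur.reverse, mySplitAux rest [], by simp [mySplitAux, hc]⟩
    · obtain ⟨q, qs, h⟩ := ih (c :: cur)
      exact ⟨q, qs, by simp [mySplitAux, hc, h]⟩

theorem mySplitAux_cur (l : List Char) : ∀ cur,
    mySplitAux l cur = (mySplitAux l []).modifyHead (cur.reverse ++ ·) := by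
  induction l with
  | nil => intro cur; simp [mySplitAux]
  | cons c rest ih =>
    intro cur
    by_cases hc : c = '!'
    · simp [mySplitAux, hc]
    · obtain ⟨q, qs, hq⟩ := mySplitAux_shape rest []
      simp only [mySplitAux, if_neg hc]
      rw [ih (c :: cur), ih [c], hq]
      simp

theorem mySplit_bang (r : List Char) : mySplitAux ('!' :: r) [] = [] :: mySplitAux r [] := by
  simp [mySplitAux]

theorem mySplit_cons (c : Char) (r : List Char) (hc : ¬ c = '!') :
    mySplitAux (c :: r) [] = (mySplitAux r []).modifyHead (c :: ·) := by
  simp only [mySplitAux, if_neg hc]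
  rw [mySplitAux_cur r [c]]
  rfl

-- Evaluation lemmas for one fold step.
theorem gStep_true (t : Int) (p : List Char) : gStep (true, t) p = (false, t + (p.length : Int)) := by
  simp [gStep]

theorem gStep_false_nil (t : Int) : gStep (false, t) [] = (true, t) := by
  simp [gStep]

theorem gStep_false_ne (t : Int) (p : List Char) (hp : p ≠ []) :
    gStep (false, t) p = (false, t + (p.length : Int) - 1) := by
  simp [gStep, hp]

-- The fold's total is linear in its starting total.
theorem foldB_linear (ps : List (List Char)) : ∀ (esc : Bool) (t : Int),
    (ps.foldl gStep (esc, t)).2 = t + (ps.foldl gStep (esc, 0)).2 := by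
  induction ps with
  | nil => intro esc t; simp
  | cons p rest ih =>
    intro esc t
    cases esc with
    | true =>
      rw [List.foldl_cons, List.foldl_cons, gStep_true, gStep_true, ih false]
      conv_rhs => rw [ih false]
      ring
    | false =>
      by_cases hp : p = []
      · subst hp
        rw [List.foldl_cons, List.foldl_cons, gStep_false_nil, gStep_false_nil]
        exact ih true t
      · rw [List.foldl_cons, List.foldl_cons, gStep_false_ne _ _ hp, gStep_false_ne _ _ hp,
          ih false]
        conv_rhs => rw [ih false]
        ring

-- Main invariant: P (head piece counted fully, rest folded from esc = false) and
-- Q (fold from esc = false models processing after an active '!').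
theorem splitFold_countSeg (n : Nat) : ∀ (l : List Char), l.length ≤ n →
    (((mySplitAux l []).headI.length : Int) + ((mySplitAux l []).tail.foldl gStep (false, 0)).2
        = countSeg l)
    ∧ (((mySplitAux l []).foldl gStep (false, 0)).2 = countSeg l.tail) := by
  induction n with
  | zero =>
    intro l h
    have : l = [] := by cases l <;> simp_all
    subst this
    constructor <;> simp [mySplitAux, gStep, countSeg_nil]
  | succ n ih =>
    intro l h
    cases l with
    | nil => constructor <;> simp [mySplitAux, gStep, countSeg_nil]
    | cons c r =>
      have hr := ih r (by simpa using h)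
      by_cases hc : c = '!'
      · subst hc
        rw [mySplit_bang]
        constructor
        · simpa [countSeg_bang] using hr.2
        · -- fold over [] :: mySplitAux r []: first step sets esc := true
          obtain ⟨q, qs, hq⟩ := mySplitAux_shape r []
          rw [List.foldl_cons, gStep_false_nil, hq, List.foldl_cons, gStep_true,
            foldB_linear qs false]
          have hp := hr.1
          rw [hq] at hp
          simp only [List.headI, List.tail] at hp
          simp only [List.tail_cons]
          omega
      · rw [mySplit_cons c r hc]
        obtain ⟨q, qs, hq⟩ := mySplitAux_shape r []
        rw [hq]
        have hp := hr.1
        rw [hq] at hp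
        simp only [List.headI, List.tail] at hp
        constructor
        · simp only [List.modifyHead, List.headI, List.tail]
          rw [countSeg_cons_ne c r hc]
          simp only [List.length_cons]
          push_cast
          omega
        · simp only [List.modifyHead]
          rw [List.foldl_cons, gStep_false_ne _ _ (by simp), foldB_linear qs false]
          simp only [List.tail_cons, List.length_cons]
          push_cast
          omega

-- B computes countSeg of the slice.
theorem altB_eq_countSeg (entry : String) (start end_ : Int) :
    get_garbage_len_alt entry start end_
      = countSeg (PySem.List.slice entry.toList (some (start + 1)) (some end_)) := by
  unfold get_garbage_len_alt
  rw [show PySem.Str.slice entry (some (start + 1)) (some end_)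
      = String.ofList (PySem.Chars.slice entry.toList (some (start + 1)) (some end_)) from rfl]
  rw [PySem.Chars.slice_eq_listSlice, String.toList_ofList]
  set s := PySem.List.slice entry.toList (some (start + 1)) (some end_) with hs
  rw [splitOn_bang]
  obtain ⟨q, qs, hq⟩ := mySplitAux_shape s []
  have hp := (splitFold_countSeg s.length s le_rfl).1
  rw [hq] at hp ⊢
  simp only [List.headI, List.tail] at hp ⊢
  rw [foldB_linear qs false (q.length : Int)]
  omega

theorem get_garbage_len_spec : Claim_equal_get_garbage_len := by
  intro entry start end_ hdom hpre
  unfold Spec_get_garbage_len get_garbage_len Pre_get_garbage_len at *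
  rw [altB_eq_countSeg]
  by_cases ha : start + 1 < end_
  · obtain ⟨h0, hend⟩ := hpre.1 ha
    rw [loopA_eq_countSeg entry end_ hend (end_ - (start + 1)).toNat (start + 1) 0 h0 le_rfl]
    rw [PySem.List.slice_toNat _ h0 (by omega)]
    simp [show end_.toNat - (start + 1).toNat = (end_ - (start + 1)).toNat from by omega]
  · have hsl : PySem.List.slice entry.toList (some (start + 1)) (some end_) = [] := by
      have hlen := PySem.List.length_slice entry.toList (start + 1) end_
      have hcl : PySem.List.clampIdx entry.toList.length end_
          ≤ PySem.List.clampIdx entry.toList.length (start + 1) := by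
        rcases hpre.2 (by omega) with h | h | h <;>
          simp only [PySem.List.clampIdx] <;> split_ifs <;> omega
      exact List.eq_nil_of_length_eq_zero (by omega)
    rw [getGarbageLoopA, dif_neg ha, hsl]
    simp [countSeg_nil]
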